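-- pv_equiv track=rewrite | github.com/noguesan/TP_Integrado_lenguajes | src/utils/funciones.py | agrupar_por_anio_y_trimestre
-- ===== SOURCE A (Python) =====
-- def agrupar_por_anio_y_trimestre(filas, col_anio=1):
--     grupos = {}
--     for fila in filas:
--         anio = fila[col_anio]
--         if anio not in grupos:
--             grupos[anio] = []
--         grupos[anio].append(fila)
--     grupos_final = separar_por_trimestre(grupos)
--     return grupos_final
--
-- def separar_por_trimestre(dict_anios):
--     dict_final = {}
--     for anio in dict_anios:
--         dict_temporal = {}
--
--         for filas in dict_anios[anio]:
--             trimestre = filas[2]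
--             if trimestre not in dict_temporal:
--                 dict_temporal[trimestre] = []
--             dict_temporal[trimestre].append(filas)
--
--         dict_final[anio] = dict_temporal
--     return dict_final
-- ===== SOURCE B (Python) =====
-- def agrupar_por_anio_y_trimestre(filas, col_anio=1):
--     grupos = {}
--     for fila in filas:
--         grupos.setdefault(fila[col_anio], {}).setdefault(fila[2], []).append(fila)
--     return grupos
-- ===== Notes on version B (the rewrite author's own statement) =====
-- stated objective: simpler
-- what changed: One pass with nested setdefault builds the year->trimester dict directly, removing the intermediate year->list dict and the second traversal (separar_por_trimestre); each row is touched once instead of twice.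
import Mathlib
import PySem

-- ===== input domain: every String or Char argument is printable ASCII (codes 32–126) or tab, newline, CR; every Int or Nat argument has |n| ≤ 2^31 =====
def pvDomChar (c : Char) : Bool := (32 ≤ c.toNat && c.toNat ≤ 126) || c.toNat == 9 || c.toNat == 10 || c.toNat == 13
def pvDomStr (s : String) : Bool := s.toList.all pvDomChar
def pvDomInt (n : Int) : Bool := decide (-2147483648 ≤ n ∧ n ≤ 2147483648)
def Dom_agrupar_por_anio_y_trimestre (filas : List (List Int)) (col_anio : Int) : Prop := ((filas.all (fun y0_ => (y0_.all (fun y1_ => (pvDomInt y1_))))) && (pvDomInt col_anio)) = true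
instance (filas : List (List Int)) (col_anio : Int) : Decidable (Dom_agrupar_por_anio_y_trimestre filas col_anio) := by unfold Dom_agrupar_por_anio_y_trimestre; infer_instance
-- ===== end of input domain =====

-- B replaces A's two passes (group by year, then re-traverse each group by trimester)
-- with a single pass building the nested dict directly via setdefault: simpler, each row touched once.

-- ===== PORT A =====
-- helper: Python's separar_por_trimestre (iterates the dict in insertion order)
def pvSeparar (dict_anios : PySem.Dict Int (List (List Int))) :
    PySem.Dict Int (PySem.Dict Int (List (List Int))) :=
  dict_anios.items.foldl (fun dict_final p =>
    let dict_temporal := p.2.foldl (fun dt fila =>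
        -- trimestre = filas[2]; outside Pre_ pyGet? is none, .getD 0 is an arbitrary total completion
        let trimestre := (PySem.List.pyGet? fila 2).getD 0
        let dt := if dt.contains trimestre then dt else dt.insert trimestre []
        dt.modify trimestre [] (fun l => l ++ [fila])) PySem.Dict.empty
    dict_final.insert p.1 dict_temporal) PySem.Dict.empty

def agrupar_por_anio_y_trimestre (filas : List (List Int)) (col_anio : Int) :
    List (Int × List (Int × List (List Int))) :=
  let grupos := filas.foldl (fun g fila =>
      -- anio = fila[col_anio] (Python negative indexing via pyGet?; total completion .getD 0 outside Pre_)
      let anio := (PySem.List.pyGet? fila col_anio).getD 0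
      let g := if g.contains anio then g else g.insert anio []
      g.modify anio [] (fun l => l ++ [fila])) PySem.Dict.empty
  (pvSeparar grupos).items.map (fun p => (p.1, p.2.items))

-- ===== PORT B =====
def agrupar_por_anio_y_trimestre_alt (filas : List (List Int)) (col_anio : Int) :
    List (Int × List (Int × List (List Int))) :=
  let grupos := filas.foldl (fun g fila =>
      let anio := (PySem.List.pyGet? fila col_anio).getD 0
      let trimestre := (PySem.List.pyGet? fila 2).getD 0
      -- grupos.setdefault(anio, {}).setdefault(trimestre, []).append(fila)
      g.modify anio PySem.Dict.empty (fun dt => dt.modify trimestre [] (fun l => l ++ [fila]))) PySem.Dict.empty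
  grupos.items.map (fun p => (p.1, p.2.items))

-- ===== PRECONDITION & SPEC =====
-- Pre_ excludes exactly the rows on which Python A raises IndexError: fila[col_anio]
-- needs -len(fila) ≤ col_anio < len(fila), fila[2] needs len(fila) > 2.
def Pre_agrupar_por_anio_y_trimestre (filas : List (List Int)) (col_anio : Int) : Prop :=
  ∀ fila ∈ filas, (-(fila.length : Int) ≤ col_anio ∧ col_anio < (fila.length : Int)) ∧ 2 < fila.length
instance (filas : List (List Int)) (col_anio : Int) : Decidable (Pre_agrupar_por_anio_y_trimestre filas col_anio) := by unfold Pre_agrupar_por_anio_y_trimestre; infer_instance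

def pvWitness_agrupar_por_anio_y_trimestre : List (List Int) × Int :=
  ([[7, 2020, 3], [8, 2020, 1], [9, 2021, 3], [10, 2020, 3]], 1)

def Spec_agrupar_por_anio_y_trimestre (filas : List (List Int)) (col_anio : Int) (out : List (Int × List (Int × List (List Int)))) : Prop := out = agrupar_por_anio_y_trimestre_alt filas col_anio
instance (filas : List (List Int)) (col_anio : Int) (out : List (Int × List (Int × List (List Int)))) : Decidable (Spec_agrupar_por_anio_y_trimestre filas col_anio out) := by unfold Spec_agrupar_por_anio_y_trimestre; infer_instance

-- ===== CLAIM (what is proved, stated in full; the proofs are below) =====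
def Claim_equal_agrupar_por_anio_y_trimestre : Prop := ∀ (filas : List (List Int)) (col_anio : Int), Dom_agrupar_por_anio_y_trimestre filas col_anio → Pre_agrupar_por_anio_y_trimestre filas col_anio → Spec_agrupar_por_anio_y_trimestre filas col_anio (agrupar_por_anio_y_trimestre filas col_anio)

-- ===== LEMMAS AND PROOFS =====

-- Python's `if k not in d: d[k] = dflt` followed by `d[k] = f(d[k])` is one modify.
theorem pv_setdefault_modify {ν : Type} (d : PySem.Dict Int ν) (t : Int) (dflt : ν) (f : ν → ν) :
    ((if d.contains t then d else d.insert t dflt).modify t dflt f) = d.modify t dflt f := by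
  by_cases h : d.contains t = true
  · simp [h]
  · simp only [Bool.not_eq_true] at h
    simp only [h, Bool.false_eq_true, if_false, PySem.Dict.modify,
      PySem.Dict.getD_insert_self, PySem.Dict.getD_of_not_contains d dflt h,
      PySem.Dict.insert_insert_self]

-- group a list of rows by trimester (the collapsed inner loop of both programs)
def pvGroupT (rows : List (List Int)) : PySem.Dict Int (List (List Int)) :=
  rows.foldl (fun dt fila =>
    dt.modify ((PySem.List.pyGet? fila 2).getD 0) [] (fun l => l ++ [fila])) PySem.Dict.empty

-- map pvGroupT over the values of a year → rows dict
def pvMapD (d : PySem.Dict Int (List (List Int))) : PySem.Dict Int (PySem.Dict Int (List (List Int))) :=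
  ⟨d.items.map (fun p => (p.1, pvGroupT p.2))⟩

theorem pv_contains_mapD (d : PySem.Dict Int (List (List Int))) (a : Int) :
    (pvMapD d).contains a = d.contains a := by
  simp [pvMapD, PySem.Dict.contains, List.any_map, Function.comp_def]

theorem pv_getD_mapD (d : PySem.Dict Int (List (List Int))) (a : Int) :
    (pvMapD d).getD a PySem.Dict.empty = pvGroupT (d.getD a []) := by
  obtain ⟨l⟩ := d
  induction l with
  | nil => rfl
  | cons p rest ih =>
    obtain ⟨k, w⟩ := p
    by_cases h : (k == a) = true
    · simp [pvMapD, PySem.Dict.getD, PySem.Dict.get?_mk_cons, h]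
    · simpa [pvMapD, PySem.Dict.getD, PySem.Dict.get?_mk_cons, h] using ih

theorem pv_mapD_insert (d : PySem.Dict Int (List (List Int))) (a : Int) (v : List (List Int)) :
    pvMapD (d.insert a v) = (pvMapD d).insert a (pvGroupT v) := by
  have key : (pvMapD (d.insert a v)).items = ((pvMapD d).insert a (pvGroupT v)).items := by
    by_cases h : d.contains a = true
    · have h' : (pvMapD d).contains a = true := (pv_contains_mapD d a).trans h
      rw [PySem.Dict.items_insert_of_contains _ _ h']
      simp only [pvMapD, PySem.Dict.items_insert_of_contains d v h]
      rw [List.map_map, List.map_map]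
      apply List.map_congr_left
      intro p _
      by_cases hp : p.1 = a <;> simp [hp]
    · simp only [Bool.not_eq_true] at h
      have h' : (pvMapD d).contains a = false := (pv_contains_mapD d a).trans h
      rw [PySem.Dict.items_insert_of_not_contains _ _ h']
      simp only [pvMapD, PySem.Dict.items_insert_of_not_contains d v h]
      simp
  exact congrArg PySem.Dict.mk key

-- one step of B on the mapped dict = the map of one step of (collapsed) A
theorem pv_step_comm (d : PySem.Dict Int (List (List Int))) (a : Int) (x : List Int) :
    (pvMapD d).modify a PySem.Dict.empty
        (fun dt => dt.modify ((PySem.List.pyGet? x 2).getD 0) [] (fun l => l ++ [x]))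
      = pvMapD (d.modify a [] (fun l => l ++ [x])) := by
  simp only [PySem.Dict.modify, pv_getD_mapD, pv_mapD_insert]
  congr 1
  show (pvGroupT (d.getD a [])).modify ((PySem.List.pyGet? x 2).getD 0) [] (fun l => l ++ [x])
      = pvGroupT (d.getD a [] ++ [x])
  simp [pvGroupT, List.foldl_append]

-- the whole fold commutes
theorem pv_fold_comm (filas : List (List Int)) (col_anio : Int)
    (d : PySem.Dict Int (List (List Int))) :
    filas.foldl (fun g fila =>
        let anio := (PySem.List.pyGet? fila col_anio).getD 0
        let trimestre := (PySem.List.pyGet? fila 2).getD 0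
        g.modify anio PySem.Dict.empty (fun dt => dt.modify trimestre [] (fun l => l ++ [fila])))
      (pvMapD d)
    = pvMapD (filas.foldl (fun g fila =>
        g.modify ((PySem.List.pyGet? fila col_anio).getD 0) [] (fun l => l ++ [fila])) d) := by
  induction filas generalizing d with
  | nil => rfl
  | cons fila rest ih =>
    simp only [List.foldl_cons]
    rw [show (let anio := (PySem.List.pyGet? fila col_anio).getD 0
          let trimestre := (PySem.List.pyGet? fila 2).getD 0
          (pvMapD d).modify anio PySem.Dict.empty
            (fun dt => dt.modify trimestre [] (fun l => l ++ [fila])))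
        = pvMapD (d.modify ((PySem.List.pyGet? fila col_anio).getD 0) [] (fun l => l ++ [fila]))
        from pv_step_comm d _ fila]
    exact ih _

-- pvSeparar of a nodup-keys dict is pvMapD of it
theorem pv_separar_eq_mapD (g : PySem.Dict Int (List (List Int))) (hg : g.keys.Nodup) :
    pvSeparar g = pvMapD g := by
  have key : (pvSeparar g).items = g.items.map (fun p => (p.1, pvGroupT p.2)) := by
    unfold pvSeparar
    have hstep : (fun (dict_final : PySem.Dict Int (PySem.Dict Int (List (List Int)))) (p : Int × List (List Int)) =>
        let dict_temporal := p.2.foldl (fun dt fila =>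
            let trimestre := (PySem.List.pyGet? fila 2).getD 0
            let dt := if dt.contains trimestre then dt else dt.insert trimestre []
            dt.modify trimestre [] (fun l => l ++ [fila])) PySem.Dict.empty
        dict_final.insert p.1 dict_temporal)
        = (fun dict_final p => dict_final.insert p.1 (pvGroupT p.2)) := by
      funext df p
      show df.insert p.1 _ = df.insert p.1 (pvGroupT p.2)
      congr 1
      unfold pvGroupT
      have hin : (fun (dt : PySem.Dict Int (List (List Int))) (fila : List Int) =>
          let trimestre := (PySem.List.pyGet? fila 2).getD 0
          let dt := if dt.contains trimestre then dt else dt.insert trimestre []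
          dt.modify trimestre [] (fun l => l ++ [fila]))
          = (fun dt fila => dt.modify ((PySem.List.pyGet? fila 2).getD 0) [] (fun l => l ++ [fila])) := by
        funext dt fila
        exact pv_setdefault_modify dt _ [] _
      rw [hin]
    rw [hstep]
    have := PySem.Dict.items_foldl_insert_fresh (l := g.items) (k := Prod.fst)
      (v := fun p => pvGroupT p.2) (d := PySem.Dict.empty)
      (by intro p _; exact PySem.Dict.contains_empty _) (by simpa [PySem.Dict.keys] using hg)
    simpa using this
  exact congrArg PySem.Dict.mk key

-- A's first loop, with the `if not in` + append collapsed to one modify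
theorem pv_loopA_collapse (filas : List (List Int)) (col_anio : Int) :
    filas.foldl (fun g fila =>
        let anio := (PySem.List.pyGet? fila col_anio).getD 0
        let g := if g.contains anio then g else g.insert anio []
        g.modify anio [] (fun l => l ++ [fila])) PySem.Dict.empty
    = filas.foldl (fun g fila =>
        g.modify ((PySem.List.pyGet? fila col_anio).getD 0) [] (fun l => l ++ [fila]))
        PySem.Dict.empty := by
  have h : (fun (g : PySem.Dict Int (List (List Int))) (fila : List Int) =>
      let anio := (PySem.List.pyGet? fila col_anio).getD 0
      let g := if g.contains anio then g else g.insert anio []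
      g.modify anio [] (fun l => l ++ [fila]))
      = (fun g fila => g.modify ((PySem.List.pyGet? fila col_anio).getD 0) [] (fun l => l ++ [fila])) := by
    funext g fila
    exact pv_setdefault_modify g _ [] _
  rw [h]

theorem pv_keys_nodup_loop (filas : List (List Int)) (col_anio : Int) :
    (filas.foldl (fun g fila =>
        g.modify ((PySem.List.pyGet? fila col_anio).getD 0) [] (fun l => l ++ [fila]))
        PySem.Dict.empty).keys.Nodup := by
  exact PySem.Dict.nodup_keys_foldl_modify_key filas
    (fun fila => (PySem.List.pyGet? fila col_anio).getD 0) []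
    (fun _ fila l => l ++ [fila]) PySem.Dict.empty PySem.Dict.nodup_keys_empty

-- ===== VERDICT (by name: the statement is the Claim_ definition above) =====
theorem agrupar_por_anio_y_trimestre_spec : Claim_equal_agrupar_por_anio_y_trimestre := by
  intro filas col_anio _ _
  show List.map (fun p => (p.1, p.2.items))
      (pvSeparar (filas.foldl (fun g fila =>
        let anio := (PySem.List.pyGet? fila col_anio).getD 0
        let g := if g.contains anio then g else g.insert anio []
        g.modify anio [] (fun l => l ++ [fila])) PySem.Dict.empty)).items
    = List.map (fun p => (p.1, p.2.items))
      (filas.foldl (fun g fila =>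
        let anio := (PySem.List.pyGet? fila col_anio).getD 0
        let trimestre := (PySem.List.pyGet? fila 2).getD 0
        g.modify anio PySem.Dict.empty (fun dt => dt.modify trimestre [] (fun l => l ++ [fila])))
        PySem.Dict.empty).items
  rw [pv_loopA_collapse]
  rw [pv_separar_eq_mapD _ (pv_keys_nodup_loop filas col_anio)]
  rw [show (PySem.Dict.empty : PySem.Dict Int (PySem.Dict Int (List (List Int)))) = pvMapD PySem.Dict.empty from rfl]
  rw [pv_fold_comm]
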